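-- pv_equiv track=rewrite | github.com/iamrameshtk/rk-utils | gh_metrics_dashbord_reporter/gh_stats_UI_v6/gh_metrics_enhanced_v1.py | analyze_version_labels
-- ===== SOURCE A (Python) =====
-- def analyze_version_labels(labels):
--     """
--     Analyze PR labels to determine RC, NPD, and Stable version counts.
--
--     - RC versions: Labels ending with '-rc' (case insensitive)
--     - NPD versions: Labels ending with '-npd' (case insensitive)
--     - Stable versions: Labels that don't end with either '-rc' or '-npd'
--     """
--     rc_versions = 0
--     npd_versions = 0
--     stable_versions = 0
--
--     for label in labels:
--         label_lower = label.lower()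
--         if label_lower.endswith('-rc'):
--             rc_versions += 1
--         elif label_lower.endswith('-npd'):
--             npd_versions += 1
--         else:
--             stable_versions += 1
--
--     return {
--         'rc_versions': rc_versions,
--         'npd_versions': npd_versions,
--         'stable_versions': stable_versions
--     }
-- ===== SOURCE B (Python) =====
-- def analyze_version_labels(labels):
--     """
--     Analyze PR labels via a staged sieve: lowercase once, strain out the '-rc'
--     labels, then strain out the '-npd' labels from the remainder; the three
--     counts are the length drops at each stage and the final survivor count.
--     """
--     xs = [label.lower() for label in labels]
--     after_rc = [s for s in xs if not s.endswith('-rc')]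
--     after_npd = [s for s in after_rc if not s.endswith('-npd')]
--     return {
--         'rc_versions': len(xs) - len(after_rc),
--         'npd_versions': len(after_rc) - len(after_npd),
--         'stable_versions': len(after_npd)
--     }
-- ===== Notes on version B (the rewrite author's own statement) =====
-- stated objective: alternative
-- what changed: Replaces A's single three-way branching counter loop by a staged sieve: lowercase the list once, filter out '-rc' labels, filter out '-npd' labels from the remainder, and read the three counts off as length differences between the surviving lists.
import Mathlib
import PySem

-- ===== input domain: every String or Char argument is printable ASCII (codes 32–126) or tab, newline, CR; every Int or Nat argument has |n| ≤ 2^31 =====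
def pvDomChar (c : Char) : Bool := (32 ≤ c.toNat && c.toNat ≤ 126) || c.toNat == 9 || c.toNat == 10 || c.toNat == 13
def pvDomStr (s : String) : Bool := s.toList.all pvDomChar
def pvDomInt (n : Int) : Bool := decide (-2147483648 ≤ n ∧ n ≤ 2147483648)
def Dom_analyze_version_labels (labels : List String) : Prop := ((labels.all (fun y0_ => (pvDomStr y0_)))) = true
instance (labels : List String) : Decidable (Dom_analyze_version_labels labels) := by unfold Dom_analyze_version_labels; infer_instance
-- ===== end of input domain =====

-- B replaces A's single three-way branching counter loop by a staged sieve
-- (filter out '-rc', then '-npd') and reads the counts off as length differences (alternative decomposition).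

-- ===== PORT A =====
def analyze_version_labels (labels : List String) : List (String × Int) :=
  let acc := labels.foldl (fun (acc : Int × Int × Int) label =>
    let label_lower := PySem.Str.lower label
    if PySem.Str.endswith label_lower "-rc" then (acc.1 + 1, acc.2.1, acc.2.2)
    else if PySem.Str.endswith label_lower "-npd" then (acc.1, acc.2.1 + 1, acc.2.2)
    else (acc.1, acc.2.1, acc.2.2 + 1)) (0, 0, 0)
  [("rc_versions", acc.1), ("npd_versions", acc.2.1), ("stable_versions", acc.2.2)]

-- ===== PORT B =====
def analyze_version_labels_alt (labels : List String) : List (String × Int) :=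
  let xs := labels.map PySem.Str.lower
  let after_rc := xs.filter (fun s => !PySem.Str.endswith s "-rc")
  let after_npd := after_rc.filter (fun s => !PySem.Str.endswith s "-npd")
  [("rc_versions", (xs.length : Int) - (after_rc.length : Int)),
   ("npd_versions", (after_rc.length : Int) - (after_npd.length : Int)),
   ("stable_versions", (after_npd.length : Int))]

-- ===== PRECONDITION & SPEC =====
def Spec_analyze_version_labels (labels : List String) (out : List (String × Int)) : Prop := out = analyze_version_labels_alt labels
instance (labels : List String) (out : List (String × Int)) : Decidable (Spec_analyze_version_labels labels out) := by unfold Spec_analyze_version_labels; infer_instance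

-- ===== CLAIM (what is proved, stated in full; the proofs are below) =====
def Claim_equal_analyze_version_labels : Prop := ∀ (labels : List String), Dom_analyze_version_labels labels → Spec_analyze_version_labels labels (analyze_version_labels labels)

-- ===== LEMMAS AND PROOFS =====

-- A's fold counts, in order: '-rc' matches, '-npd' matches among the rest, everything else.
theorem pv_fold_eq (labels : List String) : ∀ (a b c : Int),
    labels.foldl (fun (acc : Int × Int × Int) label =>
      let label_lower := PySem.Str.lower label
      if PySem.Str.endswith label_lower "-rc" then (acc.1 + 1, acc.2.1, acc.2.2)
      else if PySem.Str.endswith label_lower "-npd" then (acc.1, acc.2.1 + 1, acc.2.2)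
      else (acc.1, acc.2.1, acc.2.2 + 1)) (a, b, c)
    = (a + (labels.countP (fun l => PySem.Str.endswith (PySem.Str.lower l) "-rc") : Nat),
       b + (labels.countP (fun l => !PySem.Str.endswith (PySem.Str.lower l) "-rc"
              && PySem.Str.endswith (PySem.Str.lower l) "-npd") : Nat),
       c + (labels.countP (fun l => !PySem.Str.endswith (PySem.Str.lower l) "-rc"
              && !PySem.Str.endswith (PySem.Str.lower l) "-npd") : Nat)) := by
  induction labels with
  | nil => intro a b c; simp
  | cons l ls ih =>
    intro a b c
    by_cases h1 : PySem.Str.endswith (PySem.Str.lower l) "-rc" = true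
    · simp only [List.foldl_cons, List.countP_cons, h1, Bool.not_true, Bool.false_and,
        ite_true, Bool.false_eq_true]
      rw [ih]; simp only [Prod.mk.injEq]; push_cast; omega
    · have h1' : PySem.Str.endswith (PySem.Str.lower l) "-rc" = false := by
        simpa using h1
      by_cases h2 : PySem.Str.endswith (PySem.Str.lower l) "-npd" = true
      · simp only [List.foldl_cons, List.countP_cons, h1', h2, Bool.not_false, Bool.true_and,
          Bool.not_true, Bool.false_eq_true, ite_false, ite_true]
        rw [ih]; simp only [Prod.mk.injEq]; push_cast; omega
      · have h2' : PySem.Str.endswith (PySem.Str.lower l) "-npd" = false := by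
          simpa using h2
        simp only [List.foldl_cons, List.countP_cons, h1', h2', Bool.not_false, Bool.true_and,
          Bool.false_eq_true, ite_false]
        rw [ih]; simp only [Prod.mk.injEq]; push_cast; omega

-- countP of the complement plus countP equals the length.
theorem pv_countP_not {α : Type} (p : α → Bool) (l : List α) :
    l.countP p + l.countP (fun x => !p x) = l.length := by
  induction l with
  | nil => simp
  | cons x xs ih =>
    simp only [List.countP_cons, List.length_cons]
    rcases h : p x <;> simp_all <;> omega

theorem pv_countP_split {α : Type} (p q : α → Bool) (l : List α) :
    l.countP (fun x => !p x)
      = l.countP (fun x => !p x && q x) + l.countP (fun x => !p x && !q x) := by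
  induction l with
  | nil => simp
  | cons x xs ih =>
    simp only [List.countP_cons]
    rcases h : p x <;> rcases h2 : q x <;> simp_all <;> omega

theorem pv_countP_swap (l : List String) :
    l.countP (fun x => !PySem.Str.endswith (PySem.Str.lower x) "-npd"
        && !PySem.Str.endswith (PySem.Str.lower x) "-rc")
      = l.countP (fun x => !PySem.Str.endswith (PySem.Str.lower x) "-rc"
        && !PySem.Str.endswith (PySem.Str.lower x) "-npd") :=
  List.countP_congr (fun x _ => by rw [Bool.and_comm])

-- ===== VERDICT (by name: the statement is the Claim_ definition above) =====
theorem analyze_version_labels_spec : Claim_equal_analyze_version_labels := by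
  intro labels _
  show _ = _
  unfold analyze_version_labels analyze_version_labels_alt
  rw [pv_fold_eq]
  simp only [← List.countP_eq_length_filter, List.countP_filter, List.countP_map,
    List.length_map, Function.comp_def, List.cons.injEq, Prod.mk.injEq, and_true, true_and, pv_countP_swap]
  have h1 := pv_countP_not (fun l => PySem.Str.endswith (PySem.Str.lower l) "-rc") labels
  have h2 := pv_countP_split (fun l => PySem.Str.endswith (PySem.Str.lower l) "-rc")
    (fun l => PySem.Str.endswith (PySem.Str.lower l) "-npd") labels
  refine ⟨by omega, by omega, by omega⟩
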